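-- pv_equiv track=rewrite | github.com/amitskidrow/qq-tool | src/qq/chunking.py | simple_chunks
-- ===== SOURCE A (Python) =====
-- from typing import List
--
-- def simple_chunks(text: str, max_chars: int = 1200, overlap: int = 120) -> List[str]:
--     # naive paragraph/sentence split with sliding window
--     # split by double newlines first
--     paras = [p.strip() for p in text.split("\n\n") if p.strip()]
--     parts: list[str] = []
--     cur = ""
--     for p in paras:
--         if not cur:
--             cur = p
--         elif len(cur) + 2 + len(p) <= max_chars:
--             cur = cur + "\n\n" + p
--         else:
--             parts.append(cur)
--             cur = p
--     if cur:
--         parts.append(cur)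
--     # re-window with overlap
--     out: list[str] = []
--     i = 0
--     while i < len(parts):
--         chunk = parts[i]
--         out.append(chunk)
--         if overlap and i + 1 < len(parts):
--             # create synthetic overlap by prepending tail of current
--             tail = chunk[-overlap:]
--             parts[i + 1] = tail + "\n\n" + parts[i + 1]
--         i += 1
--     return out
-- ===== SOURCE B (Python) =====
-- from typing import List
--
-- def simple_chunks(text: str, max_chars: int = 1200, overlap: int = 120) -> List[str]:
--     # single pass: group paragraphs and emit each chunk immediately,
--     # prepending the previous emitted chunk's tail when overlap is truthy
--     out: List[str] = []
--     cur = ""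
--     for raw in text.split("\n\n"):
--         p = raw.strip()
--         if not p:
--             continue
--         if not cur:
--             cur = p
--         elif len(cur) + 2 + len(p) <= max_chars:
--             cur = cur + "\n\n" + p
--         else:
--             out.append(cur if not (overlap and out) else out[-1][-overlap:] + "\n\n" + cur)
--             cur = p
--     if cur:
--         out.append(cur if not (overlap and out) else out[-1][-overlap:] + "\n\n" + cur)
--     return out
-- ===== Notes on version B (the rewrite author's own statement) =====
-- stated objective: simpler
-- what changed: A builds the full parts list, then re-scans it while mutating the next element to prepend the overlap tail; B fuses both passes into a single loop that emits each completed group immediately, taking the overlap tail from the last emitted chunk.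
import Mathlib
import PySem

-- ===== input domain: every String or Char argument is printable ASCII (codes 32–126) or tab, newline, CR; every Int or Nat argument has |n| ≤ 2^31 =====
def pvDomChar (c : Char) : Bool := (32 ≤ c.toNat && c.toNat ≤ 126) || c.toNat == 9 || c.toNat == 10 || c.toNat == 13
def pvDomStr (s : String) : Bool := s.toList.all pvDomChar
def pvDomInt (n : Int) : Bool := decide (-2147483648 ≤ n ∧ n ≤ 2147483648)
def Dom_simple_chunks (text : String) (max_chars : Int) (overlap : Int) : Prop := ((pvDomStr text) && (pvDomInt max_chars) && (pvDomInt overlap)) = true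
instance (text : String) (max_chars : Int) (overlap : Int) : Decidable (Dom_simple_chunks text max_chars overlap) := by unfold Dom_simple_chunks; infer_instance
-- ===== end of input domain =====

-- B fuses A's two passes (build the parts list, then re-scan it mutating the next
-- element) into one pass that emits each completed group immediately, taking the
-- overlap tail from the last emitted chunk; objective: simpler single-pass structure.

-- ===== PORT A =====
-- first loop: state (parts, cur)
def pvStep1 (max_chars : Int) (st : List String × String) (p : String) : List String × String :=
  if st.2 = "" then (st.1, p)
  else if (PySem.Str.len st.2 : Int) + 2 + (PySem.Str.len p : Int) ≤ max_chars then
    (st.1, st.2 ++ "\n\n" ++ p)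
  else (st.1 ++ [st.2], p)

-- second loop: 'parts[i+1] = chunk[-overlap:] + "\n\n" + parts[i+1]' carried in the head
def pvLoop2 (overlap : Int) : List String → List String
  | [] => []
  | [c] => [c]
  | c :: n :: rs =>
    c :: pvLoop2 overlap
      ((if overlap ≠ 0 then PySem.Str.slice c (some (-overlap)) none ++ "\n\n" ++ n else n) :: rs)
termination_by l => l.length

def simple_chunks (text : String) (max_chars : Int) (overlap : Int) : List String :=
  let paras := (((PySem.Str.split? text "\n\n").getD []).map PySem.Str.strip).filter (fun p => p ≠ "")
  let st := paras.foldl (pvStep1 max_chars) ([], "")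
  let parts := if st.2 ≠ "" then st.1 ++ [st.2] else st.1
  pvLoop2 overlap parts

-- ===== PORT B =====
-- 'cur if not (overlap and out) else out[-1][-overlap:] + "\n\n" + cur' (out[-1] read under the out ≠ [] guard)
def pvChunkOf (overlap : Int) (out : List String) (cur : String) : String :=
  if overlap = 0 ∨ out = [] then cur
  else PySem.Str.slice (out.getLastD "") (some (-overlap)) none ++ "\n\n" ++ cur

def pvEmit (overlap : Int) (out : List String) (cur : String) : List String :=
  out ++ [pvChunkOf overlap out cur]

def pvStepB (max_chars overlap : Int) (st : List String × String) (raw : String) : List String × String :=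
  let p := PySem.Str.strip raw
  if p = "" then st
  else if st.2 = "" then (st.1, p)
  else if (PySem.Str.len st.2 : Int) + 2 + (PySem.Str.len p : Int) ≤ max_chars then
    (st.1, st.2 ++ "\n\n" ++ p)
  else (pvEmit overlap st.1 st.2, p)

def simple_chunks_alt (text : String) (max_chars : Int) (overlap : Int) : List String :=
  let st := ((PySem.Str.split? text "\n\n").getD []).foldl (pvStepB max_chars overlap) ([], "")
  if st.2 ≠ "" then pvEmit overlap st.1 st.2 else st.1

-- ===== PRECONDITION & SPEC =====
def Spec_simple_chunks (text : String) (max_chars : Int) (overlap : Int) (out : List String) : Prop := out = simple_chunks_alt text max_chars overlap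
instance (text : String) (max_chars : Int) (overlap : Int) (out : List String) : Decidable (Spec_simple_chunks text max_chars overlap out) := by unfold Spec_simple_chunks; infer_instance

-- ===== CLAIM (what is proved, stated in full; the proofs are below) =====
def Claim_equal_simple_chunks : Prop := ∀ (text : String) (max_chars : Int) (overlap : Int), Dom_simple_chunks text max_chars overlap → Spec_simple_chunks text max_chars overlap (simple_chunks text max_chars overlap)

-- ===== LEMMAS AND PROOFS =====

-- B's per-item step on the raw pieces equals the core step on the stripped, nonempty pieces
def pvStepCore (max_chars overlap : Int) (st : List String × String) (p : String) : List String × String :=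
  if st.2 = "" then (st.1, p)
  else if (PySem.Str.len st.2 : Int) + 2 + (PySem.Str.len p : Int) ≤ max_chars then
    (st.1, st.2 ++ "\n\n" ++ p)
  else (pvEmit overlap st.1 st.2, p)

theorem foldl_stepB_eq (mc ov : Int) (raws : List String) : ∀ st,
    raws.foldl (pvStepB mc ov) st
      = ((raws.map PySem.Str.strip).filter (fun p => p ≠ "")).foldl (pvStepCore mc ov) st := by
  induction raws with
  | nil => intro st; rfl
  | cons r rs ih =>
    intro st
    by_cases h : PySem.Str.strip r = ""
    · simp [List.foldl, pvStepB, h, ih]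
    · simp [List.foldl, pvStepB, pvStepCore, h, ih]

-- A's first loop only appends to the parts accumulator
theorem step1_accum (mc : Int) (l : List String) : ∀ ps c,
    l.foldl (pvStep1 mc) (ps, c)
      = (ps ++ (l.foldl (pvStep1 mc) ([], c)).1, (l.foldl (pvStep1 mc) ([], c)).2) := by
  induction l with
  | nil => intro ps c; simp
  | cons p l ih =>
    intro ps c
    simp only [List.foldl_cons]
    by_cases h1 : c = ""
    · simp only [pvStep1, h1, if_pos]
      exact ih ps p
    · by_cases h2 : (PySem.Str.len c : Int) + 2 + (PySem.Str.len p : Int) ≤ mc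
      · simp only [pvStep1, if_neg h1, if_pos h2]
        exact ih ps (c ++ "\n\n" ++ p)
      · simp only [pvStep1, if_neg h1, if_neg h2]
        simp only [List.nil_append]
        rw [ih (ps ++ [c]) p, ih [c] p]
        simp

-- fusing: running B's core step equals running A's first loop and emit-folding the new groups
theorem fuse (mc ov : Int) (l : List String) : ∀ out c,
    l.foldl (pvStepCore mc ov) (out, c)
      = ((l.foldl (pvStep1 mc) ([], c)).1.foldl (pvEmit ov) out, (l.foldl (pvStep1 mc) ([], c)).2) := by
  induction l with
  | nil => intro out c; simp
  | cons p l ih =>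
    intro out c
    simp only [List.foldl_cons]
    by_cases h1 : c = ""
    · simp only [pvStepCore, pvStep1, h1, if_pos]
      exact ih out p
    · by_cases h2 : (PySem.Str.len c : Int) + 2 + (PySem.Str.len p : Int) ≤ mc
      · simp only [pvStepCore, pvStep1, if_neg h1, if_pos h2]
        exact ih out (c ++ "\n\n" ++ p)
      · simp only [pvStepCore, pvStep1, if_neg h1, if_neg h2]
        simp only [List.nil_append]
        rw [ih (pvEmit ov out c) p, step1_accum mc l [c] p]
        simp [pvEmit]

-- A's second loop is the emit-fold
theorem loop2_eq_foldl (ov : Int) (ps : List String) : ∀ out c,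
    (c :: ps).foldl (pvEmit ov) out = out ++ pvLoop2 ov (pvChunkOf ov out c :: ps) := by
  induction ps with
  | nil => intro out c; simp [pvLoop2, pvEmit]
  | cons n rs ih =>
    intro out c
    have hne : out ++ [pvChunkOf ov out c] ≠ [] := by simp
    have hstep : pvChunkOf ov (out ++ [pvChunkOf ov out c]) n
        = (if ov ≠ 0 then
             PySem.Str.slice (pvChunkOf ov out c) (some (-ov)) none ++ "\n\n" ++ n
           else n) := by
      by_cases hov : ov = 0
      · simp [pvChunkOf, hov]
      · simp [pvChunkOf, hov]
    calc ((c :: n :: rs).foldl (pvEmit ov) out)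
        = (n :: rs).foldl (pvEmit ov) (out ++ [pvChunkOf ov out c]) := by
          simp [pvEmit]
      _ = (out ++ [pvChunkOf ov out c])
            ++ pvLoop2 ov (pvChunkOf ov (out ++ [pvChunkOf ov out c]) n :: rs) := ih _ _
      _ = out ++ pvLoop2 ov (pvChunkOf ov out c :: n :: rs) := by
          rw [hstep]; simp [pvLoop2]

theorem foldl_emit_nil_eq_loop2 (ov : Int) (ps : List String) :
    ps.foldl (pvEmit ov) [] = pvLoop2 ov ps := by
  cases ps with
  | nil => simp [pvLoop2]
  | cons c qs =>
    have := loop2_eq_foldl ov qs [] c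
    simpa [pvChunkOf] using this

theorem finalize_eq (ov : Int) (P : List String × String) :
    pvLoop2 ov (if P.2 ≠ "" then P.1 ++ [P.2] else P.1)
      = if P.2 ≠ "" then pvEmit ov (P.1.foldl (pvEmit ov) []) P.2
        else P.1.foldl (pvEmit ov) [] := by
  by_cases h : P.2 = ""
  · simp [h, foldl_emit_nil_eq_loop2]
  · rw [if_pos h, if_pos h, ← foldl_emit_nil_eq_loop2, List.foldl_append]
    rfl

-- ===== VERDICT (by name: the statement is the Claim_ definition above) =====
theorem simple_chunks_spec : Claim_equal_simple_chunks := by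
  intro text mc ov _
  unfold Spec_simple_chunks
  simp only [simple_chunks, simple_chunks_alt]
  rw [foldl_stepB_eq, fuse]
  exact finalize_eq ov _
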